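-- pv_equiv track=rewrite | github.com/tobipaxe/MaxSAT-Fuzzer | wcnfTool.py | IsTautologyClause
-- ===== SOURCE A (Python) =====
-- def IsTautologyClause(clause, ignore):
--     if not ignore:
--         return False
--     tmpVarVec = []
--     for var in clause:
--         tmpVarVec.append(var)
--         if -var in tmpVarVec:
--             return True
--     return False
-- ===== SOURCE B (Python) =====
-- def IsTautologyClause(clause, ignore):
--     if not ignore:
--         return False
--     s = set(clause)
--     return bool(s & {-v for v in s})
-- ===== Notes on version B (the rewrite author's own statement) =====
-- stated objective: simpler
-- what changed: Replaces A's incremental append-and-membership scan (quadratic list lookups) with one bulk set intersection: build set(clause) once and test whether it meets its own negation set.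
import Mathlib
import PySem

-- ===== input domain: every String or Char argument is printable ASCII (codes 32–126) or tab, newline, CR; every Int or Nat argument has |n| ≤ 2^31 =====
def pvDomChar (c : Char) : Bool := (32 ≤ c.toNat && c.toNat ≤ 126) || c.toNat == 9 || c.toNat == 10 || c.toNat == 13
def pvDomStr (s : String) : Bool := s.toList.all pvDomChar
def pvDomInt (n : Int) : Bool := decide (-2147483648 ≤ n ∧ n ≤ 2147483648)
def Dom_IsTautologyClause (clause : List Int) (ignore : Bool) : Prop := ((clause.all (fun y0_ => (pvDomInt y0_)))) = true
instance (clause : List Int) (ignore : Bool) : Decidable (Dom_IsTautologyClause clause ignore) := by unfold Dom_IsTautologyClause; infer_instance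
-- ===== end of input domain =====

-- B replaces A's incremental append-and-membership scan with one bulk set intersection (simpler).


-- ===== PORT A =====
-- the for-loop over clause with the growing tmpVarVec accumulator and early True return
def IsTautologyClauseLoop (tmpVarVec : List Int) (rest : List Int) : Bool :=
  match rest with
  | [] => false
  | var :: rest' =>
    let tmp' := tmpVarVec ++ [var]
    if (-var) ∈ tmp' then true else IsTautologyClauseLoop tmp' rest'

def IsTautologyClause (clause : List Int) (ignore : Bool) : Bool :=
  if !ignore then false
  else IsTautologyClauseLoop [] clause

-- ===== PORT B =====
def IsTautologyClause_alt (clause : List Int) (ignore : Bool) : Bool :=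
  if !ignore then false
  else
    let s := PySem.Set.ofList clause
    let negs := PySem.Set.ofList (s.map (fun v => -v))
    !(PySem.Set.inter s negs).isEmpty

-- ===== PRECONDITION & SPEC =====
def Spec_IsTautologyClause (clause : List Int) (ignore : Bool) (out : Bool) : Prop := out = IsTautologyClause_alt clause ignore
instance (clause : List Int) (ignore : Bool) (out : Bool) : Decidable (Spec_IsTautologyClause clause ignore out) := by unfold Spec_IsTautologyClause; infer_instance

-- ===== CLAIM (what is proved, stated in full; the proofs are below) =====
def Claim_equal_IsTautologyClause : Prop := ∀ (clause : List Int) (ignore : Bool), Dom_IsTautologyClause clause ignore → Spec_IsTautologyClause clause ignore (IsTautologyClause clause ignore)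

-- ===== LEMMAS AND PROOFS =====

-- A's loop returns true iff some literal's negation is in the accumulator-so-far,
-- i.e. in tmp or among the remaining literals themselves.
theorem loopA_iff (tmp rest : List Int) :
    IsTautologyClauseLoop tmp rest = true ↔
      (∃ v ∈ rest, -v ∈ tmp) ∨ (∃ v ∈ rest, -v ∈ rest) := by
  induction rest generalizing tmp with
  | nil => simp [IsTautologyClauseLoop]
  | cons var rest' ih =>
    simp only [IsTautologyClauseLoop]
    by_cases h : (-var) ∈ tmp ++ [var]
    · simp only [if_pos h, true_iff]
      rcases List.mem_append.1 h with h' | h'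
      · exact Or.inl ⟨var, List.mem_cons_self .., h'⟩
      · have : -var = var := List.mem_singleton.1 h'
        exact Or.inr ⟨var, List.mem_cons_self .., by rw [this]; exact List.mem_cons_self ..⟩
    · rw [if_neg h, ih]
      have hnt : -var ∉ tmp := fun hc => h (List.mem_append.2 (Or.inl hc))
      have hne : -var ≠ var := fun hc => h (List.mem_append.2 (Or.inr (List.mem_singleton.2 hc)))
      constructor
      · rintro (⟨w, hw, hwm⟩ | ⟨w, hw, hwm⟩)
        · rcases List.mem_append.1 hwm with h' | h'
          · exact Or.inl ⟨w, List.mem_cons_of_mem _ hw, h'⟩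
          · -- -w = var, so w = -var and -w = var ∈ var::rest'
            exact Or.inr ⟨w, List.mem_cons_of_mem _ hw,
              by rw [List.mem_singleton.1 h']; exact List.mem_cons_self ..⟩
        · exact Or.inr ⟨w, List.mem_cons_of_mem _ hw, List.mem_cons_of_mem _ hwm⟩
      · rintro (⟨w, hw, hwm⟩ | ⟨w, hw, hwm⟩)
        · rcases List.mem_cons.1 hw with rfl | hw'
          · exact absurd hwm hnt
          · exact Or.inl ⟨w, hw', List.mem_append.2 (Or.inl hwm)⟩
        · rcases List.mem_cons.1 hw with rfl | hw'
          · rcases List.mem_cons.1 hwm with h' | h'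
            · exact absurd h' hne
            · -- -var ∈ rest': take w' = -var, then -w' = var
              exact Or.inl ⟨-w, h', by simp⟩
          · rcases List.mem_cons.1 hwm with h' | h'
            · exact Or.inl ⟨w, hw', List.mem_append.2 (Or.inr (List.mem_singleton.2 h'))⟩
            · exact Or.inr ⟨w, hw', h'⟩

theorem altBody_iff (clause : List Int) :
    (!(PySem.Set.inter (PySem.Set.ofList clause)
        (PySem.Set.ofList ((PySem.Set.ofList clause).map (fun v => -v)))).isEmpty) = true ↔
      ∃ v ∈ clause, -v ∈ clause := by
  rw [Bool.not_eq_eq_eq_not, Bool.not_true, List.isEmpty_eq_false_iff_exists_mem]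
  constructor
  · rintro ⟨x, hx⟩
    rw [PySem.Set.mem_inter, PySem.Set.mem_ofList, PySem.Set.mem_ofList] at hx
    obtain ⟨hxs, hxn⟩ := hx
    obtain ⟨v, hv, hveq⟩ := List.mem_map.1 hxn
    rw [PySem.Set.mem_ofList] at hv
    exact ⟨x, hxs, by rw [← hveq]; simpa using hv⟩
  · rintro ⟨v, hv, hnv⟩
    refine ⟨v, ?_⟩
    rw [PySem.Set.mem_inter, PySem.Set.mem_ofList, PySem.Set.mem_ofList]
    exact ⟨hv, List.mem_map.2 ⟨-v, (PySem.Set.mem_ofList _ _).2 hnv, by simp⟩⟩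

-- ===== VERDICT (by name: the statement is the Claim_ definition above) =====
theorem IsTautologyClause_spec : Claim_equal_IsTautologyClause := by
  intro clause ignore _
  unfold Spec_IsTautologyClause IsTautologyClause IsTautologyClause_alt
  cases ignore with
  | false => simp
  | true =>
    simp only [Bool.not_true, Bool.false_eq_true, if_false]
    rw [Bool.eq_iff_iff, loopA_iff, altBody_iff]
    simp
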